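-- pv_equiv track=rewrite | github.com/WSU-4110/PyMerge | algorithm.py | generateInclusiveList
-- ===== SOURCE A (Python) =====
-- def generateInclusiveList(origFile, diffFile):
--
--     inclusiveLines = []
--
--     line = ""
--
--     for i in diffFile:
--         if origFile[i] == "\n":
--             inclusiveLines.append(line)
--             line = ""
--         else:
--             line = line + origFile[i]
--     inclusiveLines.append(line)
--
--     return inclusiveLines
-- ===== SOURCE B (Python) =====
-- def generateInclusiveList(origFile, diffFile):
--     s = "".join(origFile[i] for i in diffFile)
--     return s.split("\n")
-- ===== Notes on version B (the rewrite author's own statement) =====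
-- stated objective: simpler
-- what changed: The explicit accumulate-and-flush loop with a newline branch is replaced by building the whole selected-character string with join and delegating the segmentation to str.split('\n').
import Mathlib
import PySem

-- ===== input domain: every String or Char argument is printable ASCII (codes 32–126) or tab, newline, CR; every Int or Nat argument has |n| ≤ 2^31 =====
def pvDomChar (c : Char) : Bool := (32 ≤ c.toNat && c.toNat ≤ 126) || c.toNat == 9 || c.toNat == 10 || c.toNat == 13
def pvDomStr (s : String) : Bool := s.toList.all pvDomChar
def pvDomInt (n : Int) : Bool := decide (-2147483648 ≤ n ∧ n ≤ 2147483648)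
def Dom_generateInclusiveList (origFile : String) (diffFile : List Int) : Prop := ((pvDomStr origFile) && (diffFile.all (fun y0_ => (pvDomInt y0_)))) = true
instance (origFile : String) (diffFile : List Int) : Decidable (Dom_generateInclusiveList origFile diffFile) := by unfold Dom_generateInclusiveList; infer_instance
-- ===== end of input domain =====

-- B replaces A's accumulate-and-flush loop by join-then-split('\n'); objective: simpler (same cost).

-- ===== PORT A =====
-- Python strings are modeled as List Char during the loop and rendered with String.ofList at the end.
-- On an out-of-range index Python raises IndexError (pyGet? = none); Pre_ excludes those inputs,
-- so the `none` branch (which keeps the state) is never reached on admitted inputs.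
def generateInclusiveList (origFile : String) (diffFile : List Int) : List String :=
  let st := diffFile.foldl
    (fun (st : List (List Char) × List Char) i =>
      match PySem.List.pyGet? origFile.toList i with
      | some c => if c = '\n' then (st.1 ++ [st.2], []) else (st.1, st.2 ++ [c])
      | none => st)
    ([], [])
  (st.1 ++ [st.2]).map String.ofList

-- ===== PORT B =====
-- Source B: s = "".join(origFile[i] for i in diffFile); return s.split("\n")
-- str.split with a one-char separator is ported as List.splitOn on the code points.
def generateInclusiveList_alt (origFile : String) (diffFile : List Int) : List String :=
  let s := diffFile.flatMap (fun i => (PySem.List.pyGet? origFile.toList i).toList)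
  (List.splitOn '\n' s).map String.ofList

-- ===== PRECONDITION & SPEC =====
-- Pre_: every index is a valid Python index of origFile (otherwise A raises IndexError).
def Pre_generateInclusiveList (origFile : String) (diffFile : List Int) : Prop :=
  ∀ i ∈ diffFile, PySem.Raise.InRange origFile.toList.length i
instance (origFile : String) (diffFile : List Int) : Decidable (Pre_generateInclusiveList origFile diffFile) := by unfold Pre_generateInclusiveList; infer_instance

def pvWitness_generateInclusiveList : String × List Int := ("ab\ncd", [0, 1, 2, 3, -1])

def Spec_generateInclusiveList (origFile : String) (diffFile : List Int) (out : List String) : Prop := out = generateInclusiveList_alt origFile diffFile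
instance (origFile : String) (diffFile : List Int) (out : List String) : Decidable (Spec_generateInclusiveList origFile diffFile out) := by unfold Spec_generateInclusiveList; infer_instance

-- ===== CLAIM (what is proved, stated in full; the proofs are below) =====
def Claim_equal_generateInclusiveList : Prop := ∀ (origFile : String) (diffFile : List Int), Dom_generateInclusiveList origFile diffFile → Pre_generateInclusiveList origFile diffFile → Spec_generateInclusiveList origFile diffFile (generateInclusiveList origFile diffFile)

-- ===== LEMMAS AND PROOFS =====

-- Loop invariant: running A's fold from state (acc, line) over in-range indices and then
-- flushing equals acc followed by splitOn of line ++ selected chars.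
theorem pv_loop_eq (origFile : List Char) :
    ∀ (diffFile : List Int) (acc : List (List Char)) (line : List Char),
      (∀ i ∈ diffFile, PySem.Raise.InRange origFile.length i) →
      (diffFile.foldl
          (fun (st : List (List Char) × List Char) i =>
            match PySem.List.pyGet? origFile i with
            | some c => if c = '\n' then (st.1 ++ [st.2], []) else (st.1, st.2 ++ [c])
            | none => st)
          (acc, line)).1 ++
      [(diffFile.foldl
          (fun (st : List (List Char) × List Char) i =>
            match PySem.List.pyGet? origFile i with
            | some c => if c = '\n' then (st.1 ++ [st.2], []) else (st.1, st.2 ++ [c])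
            | none => st)
          (acc, line)).2]
      = acc ++ List.modifyHead (line ++ ·)
          (List.splitOn '\n' (diffFile.flatMap (fun i => (PySem.List.pyGet? origFile i).toList))) := by
  intro diffFile
  induction diffFile with
  | nil => intro acc line _; simp [List.splitOn, List.splitOnP_nil]
  | cons i rest ih =>
    intro acc line h
    obtain ⟨c, hc⟩ : ∃ c, PySem.List.pyGet? origFile i = some c := by
      rcases hx : PySem.List.pyGet? origFile i with _ | c
      · exact absurd (h i (by simp)) ((PySem.List.pyGet?_eq_none_iff (xs := origFile) (i := i)).mp hx)
      · exact ⟨c, rfl⟩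
    have hrest : ∀ j ∈ rest, PySem.Raise.InRange origFile.length j := fun j hj => h j (by simp [hj])
    by_cases hnl : c = '\n'
    · simp only [List.foldl_cons, List.flatMap_cons, hc, Option.toList_some]
      rw [if_pos hnl, ih _ [] hrest, hnl]
      simp only [List.splitOn, List.singleton_append, List.splitOnP_cons, beq_self_eq_true,
        if_true, List.modifyHead_cons, List.append_assoc, List.nil_append]
      rw [List.append_nil]
      exact congrArg (fun l => acc ++ line :: l) (congrFun List.modifyHead_id _)
    · simp only [List.foldl_cons, List.flatMap_cons, hc, Option.toList_some, List.singleton_append]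
      rw [if_neg hnl, ih _ (line ++ [c]) hrest]
      simp only [List.splitOn, List.splitOnP_cons, beq_iff_eq, if_neg hnl,
        List.modifyHead_modifyHead]
      congr 1
      congr 1
      funext t
      simp

-- ===== VERDICT (by name: the statement is the Claim_ definition above) =====
theorem generateInclusiveList_spec : Claim_equal_generateInclusiveList := by
  intro origFile diffFile _ hpre
  unfold Spec_generateInclusiveList generateInclusiveList generateInclusiveList_alt
  dsimp only
  rw [pv_loop_eq origFile.toList diffFile [] [] hpre]
  rcases h : List.splitOn '\n'
      (diffFile.flatMap (fun i => (PySem.List.pyGet? origFile.toList i).toList)) with _ | ⟨hd, tl⟩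
  · exact absurd h (List.splitOnP_ne_nil _ _)
  · simp
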